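-- pv_equiv track=rewrite | github.com/plilja/puzzlesg | py3/selfsimilarstrings/selfsimilarstrings.py | solve
-- ===== SOURCE A (Python) =====
-- def solve(s):
--     for i in range(len(s) - 1, 0, -1):
--         poss = True
--         for j in range(0, len(s) - i + 1):
--             sub = s[j:j+i]
--             if s.find(sub) == j and s.rfind(sub) == j:
--                 poss = False
--                 break
--         if poss:
--             return i
--     return 0
-- ===== SOURCE B (Python) =====
-- def solve(s):
--     n = len(s)
--
--     def repeats(L):
--         counts = {}
--         for j in range(n - L + 1):
--             t = s[j:j+L]
--             counts[t] = counts.get(t, 0) + 1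
--         return all(c >= 2 for c in counts.values())
--
--     lo, hi = 0, n - 1
--     while lo < hi:
--         mid = (lo + hi + 1) // 2
--         if repeats(mid):
--             lo = mid
--         else:
--             hi = mid - 1
--     return lo
-- ===== Notes on version B (the rewrite author's own statement) =====
-- stated objective: faster
-- what changed: Replaces A's descending scan that re-scans the string with find/rfind for every substring by a binary search on the answer length (the 'every substring of this length repeats' property is monotone), each candidate length checked with a single occurrence-counting dictionary pass.
import Mathlib
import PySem

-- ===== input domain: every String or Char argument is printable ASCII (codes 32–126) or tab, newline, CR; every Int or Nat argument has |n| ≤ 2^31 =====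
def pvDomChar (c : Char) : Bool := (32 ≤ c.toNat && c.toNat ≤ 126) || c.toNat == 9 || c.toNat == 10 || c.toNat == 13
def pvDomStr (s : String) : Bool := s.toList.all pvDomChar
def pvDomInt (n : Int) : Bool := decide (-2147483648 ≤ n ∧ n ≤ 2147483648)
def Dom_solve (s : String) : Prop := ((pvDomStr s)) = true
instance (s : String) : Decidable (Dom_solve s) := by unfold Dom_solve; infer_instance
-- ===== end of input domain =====

-- B replaces A's descending scan with find/rfind rescans by a binary search on the
-- answer length (the "all substrings of this length repeat" property is monotone),
-- each length checked with a single substring-occurrence counter pass (objective: faster; measured faster in a timing run).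

-- ===== PORT A =====
-- inner loop 'for j in …: sub = s[j:j+i]; if s.find(sub)==j and s.rfind(sub)==j: poss=False; break'
-- (returns the final value of poss)
def solveInner (s : String) (i : Int) : List Int → Bool
  | [] => true
  | j :: rest =>
      let sub := PySem.Str.slice s (some j) (some (j + i))
      if PySem.Str.find s sub == j && PySem.Str.rfind s sub == j then false
      else solveInner s i rest

-- outer loop 'for i in range(len(s)-1, 0, -1): … if poss: return i' / 'return 0'
def solveOuter (s : String) : List Int → Int
  | [] => 0
  | i :: rest =>
      if solveInner s i (PySem.List.pyRange 0 (PySem.Str.len s - i + 1) 1) then i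
      else solveOuter s rest

def solve (s : String) : Int :=
  solveOuter s (PySem.List.pyRange (PySem.Str.len s - 1) 0 (-1))

-- ===== PORT B =====
-- 'repeats(L)': one counting pass over all substrings of length L, then check every count ≥ 2
def altRepeats (s : String) (L : Int) : Bool :=
  let n := PySem.Str.len s
  let counts := (PySem.List.pyRange 0 (n - L + 1) 1).foldl
      (fun d j =>
        let t := PySem.Str.slice s (some j) (some (j + L))
        d.insert t (d.getD t 0 + 1))
      (PySem.Dict.empty : PySem.Dict String Int)
  counts.values.all (fun c => decide (2 ≤ c))

-- 'while lo < hi: mid = (lo+hi+1)//2; if repeats(mid): lo = mid else: hi = mid-1'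
def altLoop (s : String) (lo hi : Int) : Int :=
  if h : lo < hi then
    let mid := PySem.Int.floordiv (lo + hi + 1) 2
    if altRepeats s mid then altLoop s mid hi
    else altLoop s lo (mid - 1)
  else lo
termination_by (hi - lo).toNat
decreasing_by
  all_goals
    have h1 : lo + 1 ≤ PySem.Int.floordiv (lo + hi + 1) 2 := by
      rw [PySem.Int.le_floordiv_iff_mul_le (by omega)]; omega
  all_goals
    have h2 : PySem.Int.floordiv (lo + hi + 1) 2 < hi + 1 := by
      rw [PySem.Int.floordiv_lt_iff_lt_mul (by omega)]; omega
  all_goals omega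

def solve_alt (s : String) : Int := altLoop s 0 (PySem.Str.len s - 1)

-- ===== PRECONDITION & SPEC =====
def Spec_solve (s : String) (out : Int) : Prop := out = solve_alt s
instance (s : String) (out : Int) : Decidable (Spec_solve s out) := by unfold Spec_solve; infer_instance

-- ===== CLAIM (what is proved, stated in full; the proofs are below) =====
def Claim_equal_solve : Prop := ∀ (s : String), Dom_solve s → Spec_solve s (solve s)

-- ===== LEMMAS AND PROOFS =====

-- substring of length L starting at j
def pvSub (cs : List Char) (j L : Nat) : List Char := (cs.drop j).take L

-- "every substring of length L occurs at least twice"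
def pvRep (cs : List Char) (L : Nat) : Prop :=
  ∀ j, j + L ≤ cs.length → ∃ k, k + L ≤ cs.length ∧ k ≠ j ∧ pvSub cs k L = pvSub cs j L

-- the common characterisation of both results
def pvAns (cs : List Char) (r : Int) : Prop :=
  (r = 0 ∧ ∀ m : Nat, 1 ≤ m → m ≤ cs.length - 1 → ¬ pvRep cs m) ∨
  (∃ rn : Nat, r = ↑rn ∧ 1 ≤ rn ∧ rn ≤ cs.length - 1 ∧ pvRep cs rn ∧
    ∀ m : Nat, rn < m → m ≤ cs.length - 1 → ¬ pvRep cs m)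

theorem pvAns_unique (cs : List Char) (r1 r2 : Int) (h1 : pvAns cs r1) (h2 : pvAns cs r2) :
    r1 = r2 := by
  rcases h1 with ⟨e1, m1⟩ | ⟨a, e1, ha1, ha2, hrep1, m1⟩ <;>
    rcases h2 with ⟨e2, m2⟩ | ⟨b, e2, hb1, hb2, hrep2, m2⟩
  · omega
  · exact absurd hrep2 (m1 b hb1 hb2)
  · exact absurd hrep1 (m2 a ha1 ha2)
  · subst e1 e2
    rcases Nat.lt_trichotomy a b with h | h | h
    · exact absurd hrep2 (m1 b h hb2)
    · omega
    · exact absurd hrep1 (m2 a h ha2)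

theorem pvSlice_toList (s : String) (j L : Nat) :
    (PySem.Str.slice s (some (↑j : Int)) (some ((↑j : Int) + ↑L))).toList = pvSub s.toList j L := by
  rw [PySem.Str.toList_slice, PySem.Chars.slice_eq_listSlice,
    PySem.List.slice_toNat _ (by positivity) (by positivity)]
  simp [pvSub]
  congr 1
  omega

theorem pvSub_length (cs : List Char) (j L : Nat) (h : j + L ≤ cs.length) :
    (pvSub cs j L).length = L := by
  simp [pvSub]; omega

theorem pvSub_prefix (cs : List Char) (j L : Nat) : pvSub cs j L <+: cs.drop j :=
  List.take_prefix L (cs.drop j)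

theorem pvOcc_le (cs : List Char) (j L k : Nat) (hj : j + L ≤ cs.length) (hL : 1 ≤ L)
    (h : pvSub cs j L <+: cs.drop k) : k + L ≤ cs.length := by
  have := h.length_le
  rw [pvSub_length cs j L hj, List.length_drop] at this
  omega

theorem pvOcc_iff (cs : List Char) (j L k : Nat) (hj : j + L ≤ cs.length)
    (hk : k + L ≤ cs.length) : pvSub cs j L <+: cs.drop k ↔ pvSub cs k L = pvSub cs j L := by
  constructor
  · intro h
    have := List.prefix_iff_eq_take.mp h
    rw [pvSub_length cs j L hj] at this
    exact this.symm
  · intro h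
    rw [← h]
    exact pvSub_prefix cs k L

theorem pvFind_eq_iff (cs t : List Char) (j : Nat) (hocc : t <+: cs.drop j) :
    PySem.Chars.find cs t = ↑j ↔ ∀ k, k < j → ¬ t <+: cs.drop k := by
  have hinf : t <:+: cs := hocc.isInfix.trans (List.drop_suffix j cs).isInfix
  have hnn : 0 ≤ PySem.Chars.find cs t := (PySem.Chars.find_nonneg_iff cs t).mpr hinf
  obtain ⟨hoccf, hmin⟩ := PySem.Chars.find_spec hnn
  constructor
  · intro h k hk
    apply hmin
    omega
  · intro h
    have h1 : j ≤ (PySem.Chars.find cs t).toNat := by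
      by_contra hc
      exact h _ (by omega) hoccf
    have h2 : (PySem.Chars.find cs t).toNat ≤ j := by
      by_contra hc
      exact hmin j (by omega) hocc
    omega

theorem pvRfindGo_ge (cs t : List Char) (m k : Nat) (hk : k ≤ m) (hocc : t <+: cs.drop k) :
    (↑k : Int) ≤ PySem.Chars.rfind.go cs t m := by
  induction m with
  | zero =>
    have hk0 : k = 0 := by omega
    subst hk0
    have : t.isPrefixOf cs = true := List.isPrefixOf_iff_prefix.mpr (by simpa using hocc)
    show (0:Int) ≤ PySem.Chars.rfind.go cs t 0
    rw [show PySem.Chars.rfind.go cs t 0 = if t.isPrefixOf cs then 0 else -1 from rfl, this]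
    simp
  | succ m ih =>
    rw [show PySem.Chars.rfind.go cs t (m+1)
        = if t.isPrefixOf (List.drop (m + 1) cs) then ↑(m+1) else PySem.Chars.rfind.go cs t m from rfl]
    by_cases hp : t.isPrefixOf (List.drop (m + 1) cs) = true
    · rw [hp]
      simp
      omega
    · simp only [hp, if_neg, Bool.false_eq_true, if_false]
      rcases Nat.lt_or_ge k (m+1) with h | h
      · exact ih (by omega)
      · exfalso
        have hk1 : k = m + 1 := by omega
        subst hk1
        exact hp (List.isPrefixOf_iff_prefix.mpr hocc)

theorem pvRfindGo_eq (cs t : List Char) (m j : Nat) (hjm : j ≤ m) (hocc : t <+: cs.drop j)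
    (hmax : ∀ k, j < k → k ≤ m → ¬ t <+: cs.drop k) : PySem.Chars.rfind.go cs t m = ↑j := by
  induction m with
  | zero =>
    have hj0 : j = 0 := by omega
    subst hj0
    have : t.isPrefixOf cs = true := List.isPrefixOf_iff_prefix.mpr (by simpa using hocc)
    rw [show PySem.Chars.rfind.go cs t 0 = if t.isPrefixOf cs then 0 else -1 from rfl, this]
    simp
  | succ m ih =>
    rw [show PySem.Chars.rfind.go cs t (m+1)
        = if t.isPrefixOf (List.drop (m + 1) cs) then ↑(m+1) else PySem.Chars.rfind.go cs t m from rfl]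
    rcases Nat.lt_or_ge m j with h | h
    · have hj1 : j = m + 1 := by omega
      subst hj1
      rw [if_pos (List.isPrefixOf_iff_prefix.mpr hocc)]
    · have hp : ¬ t.isPrefixOf (List.drop (m + 1) cs) = true := by
        intro hc
        exact hmax (m+1) (by omega) (by omega) (List.isPrefixOf_iff_prefix.mp hc)
      simp only [hp, if_neg, Bool.false_eq_true, if_false]
      exact ih h (fun k hk1 hk2 => hmax k hk1 (by omega))

-- A's break condition at j holds iff the substring at j is unique
theorem pvCond_iff (s : String) (j i : Nat) (hi : 1 ≤ i) (hj : j + i ≤ s.toList.length) :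
    (PySem.Str.find s (PySem.Str.slice s (some (↑j : Int)) (some ((↑j : Int) + ↑i))) == ↑j &&
     PySem.Str.rfind s (PySem.Str.slice s (some (↑j : Int)) (some ((↑j : Int) + ↑i))) == ↑j) = true ↔
    ∀ k, k + i ≤ s.toList.length → pvSub s.toList k i = pvSub s.toList j i → k = j := by
  set cs := s.toList with hcs
  have htl : (PySem.Str.slice s (some (↑j : Int)) (some ((↑j : Int) + ↑i))).toList = pvSub cs j i :=
    pvSlice_toList s j i
  have hfind : PySem.Str.find s (PySem.Str.slice s (some (↑j : Int)) (some ((↑j : Int) + ↑i)))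
      = PySem.Chars.find cs (pvSub cs j i) := by
    rw [PySem.Str.find_eq, htl]
  have hrfind : PySem.Str.rfind s (PySem.Str.slice s (some (↑j : Int)) (some ((↑j : Int) + ↑i)))
      = PySem.Chars.rfind cs (pvSub cs j i) := by
    rw [PySem.Str.rfind_eq, htl]
  have hocc : pvSub cs j i <+: cs.drop j := pvSub_prefix cs j i
  rw [Bool.and_eq_true, beq_iff_eq, beq_iff_eq, hfind, hrfind]
  constructor
  · rintro ⟨hf, hr⟩ k hk hsub
    have hkocc : pvSub cs j i <+: cs.drop k := by
      rw [← hsub]; exact pvSub_prefix cs k i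
    rcases Nat.lt_trichotomy k j with h | h | h
    · exact absurd hkocc ((pvFind_eq_iff cs _ j hocc).mp hf k h)
    · exact h
    · exfalso
      have hge : (↑k : Int) ≤ PySem.Chars.rfind.go cs (pvSub cs j i) cs.length :=
        pvRfindGo_ge cs _ cs.length k (by omega) hkocc
      rw [show PySem.Chars.rfind cs (pvSub cs j i)
          = PySem.Chars.rfind.go cs (pvSub cs j i) cs.length from rfl] at hr
      omega
  · intro h
    have huniq : ∀ k, pvSub cs j i <+: cs.drop k → k = j := by
      intro k hk
      have hkle : k + i ≤ cs.length := pvOcc_le cs j i k hj hi hk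
      exact h k hkle ((pvOcc_iff cs j i k hj hkle).mp hk)
    constructor
    · exact (pvFind_eq_iff cs _ j hocc).mpr (fun k hkj hk => by have := huniq k hk; omega)
    · rw [show PySem.Chars.rfind cs (pvSub cs j i)
          = PySem.Chars.rfind.go cs (pvSub cs j i) cs.length from rfl]
      exact pvRfindGo_eq cs _ cs.length j (by omega) hocc
        (fun k hk1 _ hk3 => by have := huniq k hk3; omega)

theorem pvInner_forall (s : String) (i : Int) (l : List Int) :
    solveInner s i l = true ↔ ∀ j ∈ l,
      ¬ (PySem.Str.find s (PySem.Str.slice s (some j) (some (j + i))) == j &&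
         PySem.Str.rfind s (PySem.Str.slice s (some j) (some (j + i))) == j) = true := by
  induction l with
  | nil => simp [solveInner]
  | cons j rest ih =>
    rw [show solveInner s i (j :: rest)
        = (if (PySem.Str.find s (PySem.Str.slice s (some j) (some (j + i))) == j &&
            PySem.Str.rfind s (PySem.Str.slice s (some j) (some (j + i))) == j) then false
           else solveInner s i rest) from rfl]
    by_cases h : (PySem.Str.find s (PySem.Str.slice s (some j) (some (j + i))) == j &&
        PySem.Str.rfind s (PySem.Str.slice s (some j) (some (j + i))) == j) = true
    · rw [if_pos h]
      simp only [Bool.false_eq_true, false_iff]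
      intro hall
      exact hall j (List.mem_cons_self) h
    · rw [if_neg h, ih]
      constructor
      · intro hall k hk
        rcases List.mem_cons.mp hk with rfl | hk2
        · exact h
        · exact hall k hk2
      · intro hall k hk
        exact hall k (List.mem_cons_of_mem j hk)

theorem pvInner_iff (s : String) (i : Nat) (hi : 1 ≤ i) (hin : i ≤ s.toList.length) :
    solveInner s (↑i) (PySem.List.pyRange 0 (PySem.Str.len s - ↑i + 1) 1) = true ↔
    pvRep s.toList i := by
  set cs := s.toList with hcs
  have hm : PySem.Str.len s - ↑i + 1 = ((cs.length - i + 1 : Nat) : Int) := by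
    rw [PySem.Str.len_eq, ← hcs]
    omega
  rw [hm, pvInner_forall, show PySem.List.pyRange 0 ↑(cs.length - i + 1) 1
      = PySem.List.pyRange 0 ↑(cs.length - i + 1) from rfl, PySem.List.pyRange_zero_nat]
  constructor
  · intro h j hj
    have hj2 : j ∈ List.range (cs.length - i + 1) := List.mem_range.mpr (by omega)
    have := h ↑j (List.mem_map_of_mem hj2)
    rw [pvCond_iff s j i hi (by rw [← hcs]; omega)] at this
    by_contra hc
    push_neg at hc
    exact this (fun k hk hsub => by
      by_contra hkj
      exact hc k hk hkj hsub)
  · intro h j hj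
    obtain ⟨jn, hjn, rfl⟩ := List.mem_map.mp hj
    rw [List.mem_range] at hjn
    rw [pvCond_iff s jn i hi (by rw [← hcs]; omega)]
    intro huniq
    obtain ⟨k, hk1, hk2, hk3⟩ := h jn (by omega)
    exact hk2 (huniq k hk1 hk3)

theorem pvLen_le_one (l : List Nat) (j : Nat) (h : l.Nodup) (h2 : ∀ x ∈ l, x = j) :
    l.length ≤ 1 := by
  match l with
  | [] => simp
  | a :: t =>
    have ha : a = j := h2 a List.mem_cons_self
    match t with
    | [] => simp
    | b :: t2 =>
      exfalso
      have hb : b = j := h2 b (List.mem_cons_of_mem a List.mem_cons_self)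
      have := (List.nodup_cons.mp h).1
      rw [ha, hb] at this
      exact this List.mem_cons_self

theorem pvTwo_le_length (l : List Nat) (a b : Nat) (ha : a ∈ l) (hb : b ∈ l) (hab : a ≠ b) :
    2 ≤ l.length := by
  match l with
  | [] => simp at ha
  | [x] =>
    simp only [List.mem_singleton] at ha hb
    omega
  | x :: y :: t => simp

theorem pvCountP_range (m j : Nat) (p : Nat → Bool) (hj : j < m) (hpj : p j = true) :
    2 ≤ (List.range m).countP p ↔ ∃ k, k < m ∧ k ≠ j ∧ p k = true := by
  rw [List.countP_eq_length_filter]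
  have hnd : ((List.range m).filter p).Nodup := List.nodup_range.filter p
  have hjf : j ∈ (List.range m).filter p :=
    List.mem_filter.mpr ⟨List.mem_range.mpr hj, hpj⟩
  constructor
  · intro hlen
    by_contra hc
    push_neg at hc
    have hall : ∀ x ∈ (List.range m).filter p, x = j := by
      intro x hx
      obtain ⟨hx1, hx2⟩ := List.mem_filter.mp hx
      by_contra hxj
      exact absurd hx2 (by simpa using hc x (List.mem_range.mp hx1) hxj)
    have := pvLen_le_one _ j hnd hall
    omega
  · rintro ⟨k, hk1, hk2, hk3⟩
    exact pvTwo_le_length _ k j (List.mem_filter.mpr ⟨List.mem_range.mpr hk1, hk3⟩) hjf hk2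

-- B's counter check agrees with pvRep
theorem pvRepeats_iff (s : String) (L : Nat) (hL : 1 ≤ L) (hLn : L ≤ s.toList.length) :
    altRepeats s (↑L) = true ↔ pvRep s.toList L := by
  set cs := s.toList with hcs
  set m := cs.length - L + 1 with hm
  set Fn : Nat → String := fun jn => PySem.Str.slice s (some (↑jn : Int)) (some ((↑jn : Int) + ↑L))
    with hFn
  set xs : List String := (List.range m).map Fn with hxs
  have hF : ∀ a : Nat, (Fn a).toList = pvSub cs a L := fun a => pvSlice_toList s a L
  have hcounts : altRepeats s (↑L) = (PySem.Dict.counter xs).values.all (fun c => decide (2 ≤ c)) := by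
    simp only [altRepeats]
    rw [PySem.Str.len_eq, ← hcs,
      show (cs.length : Int) - ↑L + 1 = ((m : Nat) : Int) from by rw [hm]; omega,
      show PySem.List.pyRange 0 ↑m 1 = PySem.List.pyRange 0 ↑m from rfl,
      PySem.List.pyRange_zero_nat, List.foldl_map, hxs,
      ← PySem.Dict.foldl_insert_getD_add_one_eq_counter, List.foldl_map]
  have hvals : (PySem.Dict.counter xs).values
      = (PySem.Set.ofList xs).map (fun t => ((xs.count t : Nat) : Int)) := by
    rw [PySem.Dict.values_eq_map_keys _ (PySem.Dict.nodup_keys_counter xs) 0,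
      PySem.Dict.keys_counter]
    exact List.map_congr_left (fun t _ => PySem.Dict.getD_counter xs t)
  have hcount : ∀ j : Nat, xs.count (Fn j) = (List.range m).countP (fun k => Fn k == Fn j) := by
    intro j
    rw [hxs, List.count_eq_countP, List.countP_map]
    rfl
  have hFeq : ∀ k j : Nat, Fn k = Fn j ↔ pvSub cs k L = pvSub cs j L := by
    intro k j
    constructor
    · intro h; rw [← hF k, ← hF j, h]
    · intro h; exact String.toList_inj.mp (by rw [hF k, hF j, h])
  rw [hcounts, hvals, List.all_eq_true]
  constructor
  · intro h j hj
    have hjm : j < m := by omega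
    have h2 : 2 ≤ xs.count (Fn j) := by
      have := h _ (List.mem_map_of_mem (PySem.Set.mem_ofList xs (Fn j) |>.mpr
        (List.mem_map_of_mem (List.mem_range.mpr hjm))))
      simp only [decide_eq_true_eq] at this
      exact_mod_cast this
    rw [hcount j] at h2
    obtain ⟨k, hk1, hk2, hk3⟩ := (pvCountP_range m j _ hjm (beq_self_eq_true (Fn j))).mp h2
    exact ⟨k, by omega, hk2, (hFeq k j).mp (eq_of_beq hk3)⟩
  · intro h c hcmem
    obtain ⟨t, ht, rfl⟩ := List.mem_map.mp hcmem
    obtain ⟨j, hjm, rfl⟩ := List.mem_map.mp ((PySem.Set.mem_ofList xs t).mp ht)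
    rw [List.mem_range] at hjm
    simp only [decide_eq_true_eq]
    have : 2 ≤ xs.count (Fn j) := by
      rw [hcount j]
      obtain ⟨k, hk1, hk2, hk3⟩ := h j (by omega)
      exact (pvCountP_range m j _ hjm (beq_self_eq_true (Fn j))).mpr
        ⟨k, by omega, hk2, beq_iff_eq.mpr ((hFeq k j).mpr hk3)⟩
    exact_mod_cast this

-- monotonicity: if every substring of length L+1 repeats, so does every one of length L
theorem pvRep_step (cs : List Char) (L : Nat) (hL : 1 ≤ L) (hn : L + 1 ≤ cs.length)
    (h : pvRep cs (L + 1)) : pvRep cs L := by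
  have htake : ∀ a b : Nat, pvSub cs a (L+1) = pvSub cs b (L+1) → pvSub cs a L = pvSub cs b L := by
    intro a b hab
    have : ∀ x : Nat, (pvSub cs x (L+1)).take L = pvSub cs x L := by
      intro x
      simp [pvSub, List.take_take]
    rw [← this a, ← this b, hab]
  have hdrop : ∀ a b : Nat, pvSub cs a (L+1) = pvSub cs b (L+1) →
      pvSub cs (a+1) L = pvSub cs (b+1) L := by
    intro a b hab
    have : ∀ x : Nat, (pvSub cs x (L+1)).drop 1 = pvSub cs (x+1) L := by
      intro x
      simp [pvSub, List.drop_take, List.drop_drop]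
    rw [← this a, ← this b, hab]
  intro j hj
  rcases Nat.lt_or_ge (j + L) cs.length with hcase | hcase
  · obtain ⟨k, hk1, hk2, hk3⟩ := h j (by omega)
    exact ⟨k, by omega, hk2, htake k j hk3⟩
  · -- j is the last position: j + L = cs.length, use the window one to the left
    have hj1 : 1 ≤ j := by omega
    obtain ⟨k, hk1, hk2, hk3⟩ := h (j - 1) (by omega)
    refine ⟨k + 1, by omega, by omega, ?_⟩
    have := hdrop k (j - 1) hk3
    rwa [Nat.sub_add_cancel hj1] at this

theorem pvRep_mono (cs : List Char) (M L : Nat) (hM : 1 ≤ M) (hML : M ≤ L)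
    (hLn : L ≤ cs.length) (h : pvRep cs L) : pvRep cs M := by
  induction L with
  | zero => omega
  | succ L ih =>
    rcases Nat.lt_or_ge M (L + 1) with hlt | hge
    · have hL1 : 1 ≤ L := by omega
      exact ih (by omega) (by omega) (pvRep_step cs L hL1 hLn h)
    · have : M = L + 1 := by omega
      subst this
      exact h

-- A's descending scan computes pvAns
theorem pvOuter_spec (s : String) (i : Nat) (hi : i ≤ s.toList.length - 1)
    (hmax : ∀ m : Nat, i < m → m ≤ s.toList.length - 1 → ¬ pvRep s.toList m) :
    pvAns s.toList (solveOuter s (PySem.List.pyRange (↑i) 0 (-1))) := by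
  induction i with
  | zero =>
    rw [PySem.List.pyRange_neg_one_eq_nil (by omega)]
    exact Or.inl ⟨rfl, fun m hm1 hm2 => hmax m (by omega) hm2⟩
  | succ i ih =>
    rw [PySem.List.pyRange_neg_one_cons (by positivity),
      show ((i+1 : Nat) : Int) - 1 = ((i : Nat) : Int) from by push_cast; ring]
    rw [show solveOuter s (((i+1 : Nat) : Int) :: PySem.List.pyRange (↑i) 0 (-1))
        = (if solveInner s ((i+1 : Nat) : Int)
              (PySem.List.pyRange 0 (PySem.Str.len s - ((i+1 : Nat) : Int) + 1) 1)
           then ((i+1 : Nat) : Int) else solveOuter s (PySem.List.pyRange (↑i) 0 (-1))) from rfl]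
    by_cases hc : solveInner s ((i+1 : Nat) : Int)
        (PySem.List.pyRange 0 (PySem.Str.len s - ((i+1 : Nat) : Int) + 1) 1) = true
    · rw [if_pos hc]
      have hrep : pvRep s.toList (i+1) :=
        (pvInner_iff s (i+1) (by omega) (by omega)).mp hc
      exact Or.inr ⟨i+1, rfl, by omega, by omega, hrep, fun m hm1 hm2 => hmax m (by omega) hm2⟩
    · rw [if_neg hc]
      have hnrep : ¬ pvRep s.toList (i+1) := fun hr =>
        hc ((pvInner_iff s (i+1) (by omega) (by omega)).mpr hr)
      refine ih (by omega) (fun m hm1 hm2 => ?_)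
      rcases Nat.lt_or_ge (i+1) m with h | h
      · exact hmax m h hm2
      · have : m = i + 1 := by omega
        subst this
        exact hnrep

theorem pvSolve_ans (s : String) : pvAns s.toList (solve s) := by
  unfold solve
  rcases Nat.eq_zero_or_pos s.toList.length with h0 | hpos
  · rw [PySem.Str.len_eq, h0, PySem.List.pyRange_neg_one_eq_nil (by omega)]
    exact Or.inl ⟨rfl, fun m hm1 hm2 => by omega⟩
  · rw [PySem.Str.len_eq,
      show (s.toList.length : Int) - 1 = ((s.toList.length - 1 : Nat) : Int) from by omega]
    exact pvOuter_spec s (s.toList.length - 1) (le_refl _) (fun m hm1 hm2 => by omega)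

-- B's binary search computes pvAns
theorem pvAltLoop_spec (s : String) (lo hi : Int) (hlo : 0 ≤ lo) (hlohi : lo ≤ hi)
    (hhi : hi ≤ (s.toList.length : Int) - 1)
    (hcur : lo = 0 ∨ ∃ ln : Nat, lo = ↑ln ∧ 1 ≤ ln ∧ pvRep s.toList ln)
    (hmax : ∀ m : Nat, hi < ↑m → m ≤ s.toList.length - 1 → ¬ pvRep s.toList m) :
    pvAns s.toList (altLoop s lo hi) := by
  generalize hfuel : (hi - lo).toNat = f
  induction f using Nat.strong_induction_on generalizing lo hi with
  | _ f ih =>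
    rw [altLoop]
    by_cases h : lo < hi
    · rw [dif_pos h]
      have hmid1 : lo + 1 ≤ PySem.Int.floordiv (lo + hi + 1) 2 := by
        rw [PySem.Int.le_floordiv_iff_mul_le (by omega)]; omega
      have hmid2 : PySem.Int.floordiv (lo + hi + 1) 2 < hi + 1 := by
        rw [PySem.Int.floordiv_lt_iff_lt_mul (by omega)]; omega
      set mid := PySem.Int.floordiv (lo + hi + 1) 2 with hmiddef
      have hmidn : mid = ((mid.toNat : Nat) : Int) := by omega
      set midn := mid.toNat with hmidndef
      have hmn1 : 1 ≤ midn := by omega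
      have hmnn : midn ≤ s.toList.length := by omega
      have hrep_iff : altRepeats s mid = true ↔ pvRep s.toList midn := by
        rw [hmidn]
        exact pvRepeats_iff s midn hmn1 hmnn
      by_cases hr : altRepeats s mid = true
      · rw [if_pos hr]
        exact ih (hi - mid).toNat (by omega) mid hi (by omega) (by omega) hhi
          (Or.inr ⟨midn, hmidn, hmn1, hrep_iff.mp hr⟩) hmax rfl
      · rw [if_neg hr]
        refine ih (mid - 1 - lo).toNat (by omega) lo (mid - 1) hlo (by omega) (by omega)
          hcur (fun m hm1 hm2 => ?_) rfl
        rcases Int.lt_or_le hi (↑m) with hcase | hcase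
        · exact hmax m hcase hm2
        · intro hrepm
          exact hr (hrep_iff.mpr (pvRep_mono s.toList midn m hmn1 (by omega) (by omega) hrepm))
    · rw [dif_neg h]
      have hlohieq : lo = hi := by omega
      rcases hcur with rfl | ⟨ln, rfl, hln1, hrepln⟩
      · exact Or.inl ⟨rfl, fun m hm1 hm2 => hmax m (by omega) hm2⟩
      · exact Or.inr ⟨ln, rfl, hln1, by omega, hrepln, fun m hm1 hm2 => hmax m (by omega) hm2⟩

theorem pvSolveAlt_ans (s : String) : pvAns s.toList (solve_alt s) := by
  unfold solve_alt
  rw [PySem.Str.len_eq]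
  rcases Nat.eq_zero_or_pos s.toList.length with h0 | hpos
  · rw [h0, altLoop]
    norm_num
    exact Or.inl ⟨rfl, fun m hm1 hm2 => by omega⟩
  · exact pvAltLoop_spec s 0 ((s.toList.length : Int) - 1) (by omega) (by omega) (by omega)
      (Or.inl rfl) (fun m hm1 hm2 => by omega)



-- ===== VERDICT (by name: the statement is the Claim_ definition above) =====
theorem solve_spec : Claim_equal_solve := by
  intro s _
  unfold Spec_solve
  exact pvAns_unique s.toList _ _ (pvSolve_ans s) (pvSolveAlt_ans s)
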